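-- pv_equiv track=rewrite | github.com/hannaofficial/RishiAI | services/orchestrator/memory/user_memory.py | summarize_turns_to_note
-- ===== SOURCE A (Python) =====
-- from typing import List
--
-- def summarize_turns_to_note(turns: List[dict]) -> str:
--     """
--     Very small, deterministic stub (no LLM):
--     - take last 2 user/guide turns
--     - make a compact note we can embed
--     - simple English, no PII
--     """
--     if not turns:
--         return ""
--     last_user = next((t["text"] for t in reversed(turns) if t.get("role")=="user"), "")
--     last_guide = next((t["text"] for t in reversed(turns) if t.get("role")=="guide"), "")
--     note = (
--         f"User concern (short): {last_user[:160]}. "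
--         f"Guide hint (short): {last_guide[:160]}."
--     )
--     return note
-- ===== SOURCE B (Python) =====
-- from typing import List
--
-- def summarize_turns_to_note(turns: List[dict]) -> str:
--     if not turns:
--         return ""
--     last_user_turn = None
--     last_guide_turn = None
--     for t in turns:
--         role = t.get("role")
--         if role == "user":
--             last_user_turn = t
--         elif role == "guide":
--             last_guide_turn = t
--     last_user = last_user_turn["text"] if last_user_turn is not None else ""
--     last_guide = last_guide_turn["text"] if last_guide_turn is not None else ""
--     return (
--         f"User concern (short): {last_user[:160]}. "
--         f"Guide hint (short): {last_guide[:160]}."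
--     )
-- ===== Notes on version B (the rewrite author's own statement) =====
-- stated objective: alternative
-- what changed: Replaces the two reverse-scan generator/next() searches with one forward loop that maintains the last user turn and last guide turn in two slots, reading 'text' only after the loop.
import Mathlib
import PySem

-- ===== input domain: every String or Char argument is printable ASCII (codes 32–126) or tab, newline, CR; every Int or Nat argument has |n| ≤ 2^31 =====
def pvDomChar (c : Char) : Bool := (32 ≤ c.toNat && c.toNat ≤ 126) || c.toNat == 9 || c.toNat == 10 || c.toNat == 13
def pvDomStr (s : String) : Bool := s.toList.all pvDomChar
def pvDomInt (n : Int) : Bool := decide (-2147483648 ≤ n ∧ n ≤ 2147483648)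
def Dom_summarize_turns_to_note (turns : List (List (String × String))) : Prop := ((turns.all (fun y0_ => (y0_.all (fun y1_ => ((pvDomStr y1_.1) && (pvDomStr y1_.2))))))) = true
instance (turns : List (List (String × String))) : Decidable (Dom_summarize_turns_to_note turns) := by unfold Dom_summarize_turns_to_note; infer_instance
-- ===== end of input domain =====

-- B replaces A's two reverse-scan next() searches with one forward loop keeping the last
-- user/guide turn in two slots ('alternative', same cost). Header: equivalence is about
-- the return value; neither program mutates its argument.

-- ===== PORT A =====
-- next((t["text"] for t in <ts> if t.get("role")==role), "") over an already-reversed list;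
-- none = KeyError (the last matching turn has no "text"), excluded by Pre_.
def pyNextText (role : String) : List (List (String × String)) → Option String
  | [] => some ""
  | t :: rest =>
      if (PySem.Dict.mk t).get? "role" == some role then (PySem.Dict.mk t).get? "text"
      else pyNextText role rest

def summarize_turns_to_note (turns : List (List (String × String))) : String :=
  if turns = [] then ""
  else
    match pyNextText "user" turns.reverse, pyNextText "guide" turns.reverse with
    | some last_user, some last_guide =>
        "User concern (short): " ++ PySem.Str.slice last_user none (some 160) ++
        ". Guide hint (short): " ++ PySem.Str.slice last_guide none (some 160) ++ "."
    | _, _ => ""  -- KeyError in Python; outside Pre_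

-- ===== PORT B =====
def summarize_turns_to_note_alt (turns : List (List (String × String))) : String :=
  if turns = [] then ""
  else
    let s := turns.foldl
      (fun (s : Option (List (String × String)) × Option (List (String × String))) t =>
        let role := (PySem.Dict.mk t).get? "role"
        if role == some "user" then (some t, s.2)
        else if role == some "guide" then (s.1, some t)
        else s)
      (none, none)
    let last_user? : Option String :=
      match s.1 with | some t => (PySem.Dict.mk t).get? "text" | none => some ""
    let last_guide? : Option String :=
      match s.2 with | some t => (PySem.Dict.mk t).get? "text" | none => some ""
    match last_user? with
    | none => ""  -- KeyError in Python; outside Pre_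
    | some last_user =>
      match last_guide? with
      | none => ""  -- KeyError in Python; outside Pre_
      | some last_guide =>
          "User concern (short): " ++ PySem.Str.slice last_user none (some 160) ++
          ". Guide hint (short): " ++ PySem.Str.slice last_guide none (some 160) ++ "."

-- ===== PRECONDITION & SPEC =====
-- Pre_ excludes exactly the inputs where Python A raises KeyError: the last turn whose
-- role is "user" (resp. "guide") lacks a "text" key.
def Pre_summarize_turns_to_note (turns : List (List (String × String))) : Prop :=
  ((turns.reverse.find? (fun t => (PySem.Dict.mk t).get? "role" == some "user")).all
      (fun t => ((PySem.Dict.mk t).get? "text").isSome)) = true ∧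
  ((turns.reverse.find? (fun t => (PySem.Dict.mk t).get? "role" == some "guide")).all
      (fun t => ((PySem.Dict.mk t).get? "text").isSome)) = true
instance (turns : List (List (String × String))) : Decidable (Pre_summarize_turns_to_note turns) := by
  unfold Pre_summarize_turns_to_note; infer_instance

def pvWitness_summarize_turns_to_note : (List (List (String × String))) :=
  [[("role", "user"), ("text", "hi")], [("role", "guide"), ("text", "go")]]

def Spec_summarize_turns_to_note (turns : List (List (String × String))) (out : String) : Prop := out = summarize_turns_to_note_alt turns
instance (turns : List (List (String × String))) (out : String) : Decidable (Spec_summarize_turns_to_note turns out) := by unfold Spec_summarize_turns_to_note; infer_instance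

-- ===== CLAIM (what is proved, stated in full; the proofs are below) =====
def Claim_equal_summarize_turns_to_note : Prop := ∀ (turns : List (List (String × String))), Dom_summarize_turns_to_note turns → Pre_summarize_turns_to_note turns → Spec_summarize_turns_to_note turns (summarize_turns_to_note turns)

-- ===== LEMMAS AND PROOFS =====

-- B's single forward fold computes, in each slot, the first match of the reversed list
-- (falling back to the initial slot).
theorem fold_eq_revFind (l : List (List (String × String)))
    (s : Option (List (String × String)) × Option (List (String × String))) :
    l.foldl
      (fun (s : Option (List (String × String)) × Option (List (String × String))) t =>
        let role := (PySem.Dict.mk t).get? "role"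
        if role == some "user" then (some t, s.2)
        else if role == some "guide" then (s.1, some t)
        else s) s
    = ((l.reverse.find? (fun t => (PySem.Dict.mk t).get? "role" == some "user")).or s.1,
       (l.reverse.find? (fun t => (PySem.Dict.mk t).get? "role" == some "guide")).or s.2) := by
  induction l generalizing s with
  | nil => simp
  | cons t rest ih =>
      simp only [List.foldl_cons, ih, List.reverse_cons, List.find?_append]
      by_cases hu : ((PySem.Dict.mk t).get? "role" == some "user") = true
      · have hg : ((PySem.Dict.mk t).get? "role" == some "guide") = false := by
          rcases h : (PySem.Dict.mk t).get? "role" with _ | v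
          · simp [h] at hu
          · simp [h] at hu ⊢; simp [hu]
        simp [hu, hg, List.find?]
      · by_cases hg : ((PySem.Dict.mk t).get? "role" == some "guide") = true
        · simp [hu, hg, List.find?]
        · simp [hu, hg, List.find?]

-- A's generator/next() is the first match of the list it scans.
theorem pyNextText_eq_find (role : String) (l : List (List (String × String))) :
    pyNextText role l
    = match l.find? (fun t => (PySem.Dict.mk t).get? "role" == some role) with
      | some t => (PySem.Dict.mk t).get? "text"
      | none => some "" := by
  induction l with
  | nil => simp [pyNextText]
  | cons t rest ih =>
      by_cases h : ((PySem.Dict.mk t).get? "role" == some role) = true <;>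
        simp [pyNextText, List.find?, h, ih]

-- ===== VERDICT (by name: the statement is the Claim_ definition above) =====
theorem summarize_turns_to_note_spec : Claim_equal_summarize_turns_to_note := by
  intro turns _ _
  unfold Spec_summarize_turns_to_note summarize_turns_to_note summarize_turns_to_note_alt
  by_cases h : turns = []
  · simp [h]
  · simp only [h, if_false, fold_eq_revFind, pyNextText_eq_find, Option.or_none]
    cases turns.reverse.find? (fun t => (PySem.Dict.mk t).get? "role" == some "user") with
    | none =>
        cases turns.reverse.find? (fun t => (PySem.Dict.mk t).get? "role" == some "guide") with
        | none => rfl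
        | some g => cases hg : (PySem.Dict.mk g).get? "text" <;> simp [hg]
    | some u =>
        cases turns.reverse.find? (fun t => (PySem.Dict.mk t).get? "role" == some "guide") with
        | none => cases hu : (PySem.Dict.mk u).get? "text" <;> simp [hu]
        | some g =>
            cases hu : (PySem.Dict.mk u).get? "text" <;> cases hg : (PySem.Dict.mk g).get? "text" <;>
              simp [hu, hg]
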